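-- pv_equiv track=rewrite | github.com/nermadie/CodeForces_Solutions | CodeforcesRound990Div2/prob02.py | solve
-- ===== SOURCE A (Python) =====
-- def solve(n, s):
--     char_dict = {}
--     for i in s:
--         char_dict.setdefault(i, 0)
--         char_dict[i] += 1
--     char_list = list(char_dict.items())
--     char_list.sort(key=lambda x: x[1], reverse=True)
--     alt_index = s.index(char_list[-1][0])
--     return s[:alt_index] + char_list[0][0] + s[alt_index + 1 :]
-- ===== SOURCE B (Python) =====
-- def solve(n, s):
--     counts = {}
--     for ch in s:
--         counts[ch] = counts.get(ch, 0) + 1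
--     best_max = None  # (char, count) with the largest count; earliest first-appearance wins ties
--     best_min = None  # (char, count) with the smallest count; latest first-appearance wins ties
--     for ch, c in counts.items():
--         if best_max is None or c > best_max[1]:
--             best_max = (ch, c)
--         if best_min is None or c <= best_min[1]:
--             best_min = (ch, c)
--     idx = s.index(best_min[0])
--     return s[:idx] + best_max[0] + s[idx + 1:]
-- ===== Notes on version B (the rewrite author's own statement) =====
-- stated objective: alternative
-- what changed: B replaces A's stable reverse sort of the character-frequency table by a single linear scan over the dict items that tracks the max-count entry (strict '>', so earliest first-appearance wins ties) and the min-count entry ('<=', so latest first-appearance wins ties), reproducing the sort's tie-breaking exactly.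
import Mathlib
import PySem

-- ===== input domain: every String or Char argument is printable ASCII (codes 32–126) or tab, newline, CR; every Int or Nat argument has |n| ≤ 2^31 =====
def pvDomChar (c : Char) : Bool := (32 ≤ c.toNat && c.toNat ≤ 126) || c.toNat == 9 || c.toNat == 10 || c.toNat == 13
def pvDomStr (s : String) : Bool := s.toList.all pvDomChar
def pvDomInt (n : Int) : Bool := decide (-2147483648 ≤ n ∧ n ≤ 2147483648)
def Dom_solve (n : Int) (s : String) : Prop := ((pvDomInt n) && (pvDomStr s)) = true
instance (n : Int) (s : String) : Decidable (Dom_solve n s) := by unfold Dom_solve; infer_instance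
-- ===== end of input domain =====

-- B replaces A's stable reverse sort of the frequency table by a single linear scan that
-- tracks the max-count entry (strict '>' ⇒ earliest tie wins) and the min-count entry
-- ('<=' ⇒ latest tie wins); objective: alternative (O(k) scan instead of O(k log k) sort
-- over the k distinct characters — k is tiny here, so no speed is claimed).

-- ===== PORT A =====
def solve (n : Int) (s : String) : String :=
  let cs := s.toList
  -- for i in s: char_dict.setdefault(i, 0); char_dict[i] += 1
  let charDict := cs.foldl (fun d c => (PySem.Dict.setdefault d c 0).modify c 0 (· + 1)) (PySem.Dict.empty : PySem.Dict Char Int)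
  -- char_list = list(char_dict.items()); char_list.sort(key=lambda x: x[1], reverse=True)
  let charList := PySem.List.sorted charDict.items (fun x => x.2) true
  match PySem.List.pyGet? charList (-1) with
  | none => ""                                   -- char_list[-1]: IndexError (excluded by Pre_solve)
  | some lastp =>
    -- alt_index = s.index(char_list[-1][0]); exact: a 1-char needle, so substring index = first index of the char
    match PySem.List.index? cs lastp.1 with
    | none => ""                                 -- ValueError (unreachable: the key occurs in s)
    | some altIndex =>
      match PySem.List.pyGet? charList 0 with
      | none => ""                               -- char_list[0]: IndexError (unreachable here)
      | some firstp =>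
        -- s[:alt_index] + char_list[0][0] + s[alt_index+1:]
        String.ofList (PySem.List.slice cs none (some (altIndex : Int)) ++
                   firstp.1 :: PySem.List.slice cs (some ((altIndex : Int) + 1)) none)

-- ===== PORT B =====
-- one scan step: best_max updates on a strict increase, best_min on '<='
def bstep (st : Option (Char × Int) × Option (Char × Int)) (p : Char × Int) :
    Option (Char × Int) × Option (Char × Int) :=
  (match st.1 with
   | none => some p
   | some q => if q.2 < p.2 then some p else some q,
   match st.2 with
   | none => some p
   | some q => if p.2 ≤ q.2 then some p else some q)

def solve_alt (n : Int) (s : String) : String :=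
  let cs := s.toList
  -- counts[ch] = counts.get(ch, 0) + 1
  let counts := cs.foldl (fun d c => d.insert c (d.getD c 0 + 1)) (PySem.Dict.empty : PySem.Dict Char Int)
  let st := counts.items.foldl bstep (none, none)
  match st.1, st.2 with
  | some bestMax, some bestMin =>
    match PySem.List.index? cs bestMin.1 with   -- s.index(best_min[0]); exact: 1-char needle
    | none => ""                                -- ValueError (unreachable)
    | some idx =>
      -- s[:idx] + best_max[0] + s[idx+1:]
      String.ofList (PySem.List.slice cs none (some (idx : Int)) ++
                 bestMax.1 :: PySem.List.slice cs (some ((idx : Int) + 1)) none)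
  | _, _ => ""                                  -- best_min is None: TypeError (excluded by Pre_solve)

-- ===== PRECONDITION & SPEC =====
-- Pre_ excludes only the empty string, on which A raises IndexError (and B raises TypeError).
def Pre_solve (n : Int) (s : String) : Prop := s ≠ ""
instance (n : Int) (s : String) : Decidable (Pre_solve n s) := by unfold Pre_solve; infer_instance
def pvWitness_solve : Int × String := (4, "abca")

def Spec_solve (n : Int) (s : String) (out : String) : Prop := out = solve_alt n s
instance (n : Int) (s : String) (out : String) : Decidable (Spec_solve n s out) := by unfold Spec_solve; infer_instance

-- ===== CLAIM (what is proved, stated in full; the proofs are below) =====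
def Claim_equal_solve : Prop := ∀ (n : Int) (s : String), Dom_solve n s → Pre_solve n s → Spec_solve n s (solve n s)

-- ===== LEMMAS AND PROOFS =====

-- A's setdefault-then-increment step is exactly the Counter step, for any dict state
theorem step_eq (d : PySem.Dict Char Int) (c : Char) :
    (PySem.Dict.setdefault d c 0).modify c 0 (· + 1) = d.modify c 0 (· + 1) := by
  by_cases h : d.contains c = true
  · rw [PySem.Dict.setdefault_of_contains d 0 h]
  · rw [PySem.Dict.setdefault_of_not_contains d 0 (by simpa using h)]
    simp [PySem.Dict.modify, PySem.Dict.getD_insert_self, PySem.Dict.insert_insert_self,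
      PySem.Dict.getD_of_not_contains d 0 (by simpa using h)]

theorem head?_insertBy {α : Type} (before : α → α → Bool) (x y : α) (ys : List α) :
    (PySem.List.insertBy before x (y :: ys)).head? = some (if before x y then x else y) := by
  simp only [PySem.List.insertBy]; split <;> simp

theorem getLast?_insertBy {α : Type} (before : α → α → Bool) (x : α) (l : List α) :
    (PySem.List.insertBy before x l).getLast? =
      if l.all (fun y => ! before x y) then some x else l.getLast? := by
  induction l with
  | nil => simp [PySem.List.insertBy]
  | cons y ys ih =>
    cases h : before x y with
    | true => simp [PySem.List.insertBy, h, List.getLast?_cons]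
    | false =>
      simp only [PySem.List.insertBy, h, Bool.false_eq_true, if_false, List.getLast?_cons, ih]
      cases hys : ys.all (fun y => ! before x y) <;> simp [h, hys]

-- in a descending-pairwise list the last element is minimal
theorem getLast_min {l : List (Char × Int)} (hp : l.Pairwise (fun a b => b.2 ≤ a.2))
    {m : Char × Int} (hm : l.getLast? = some m) : ∀ y ∈ l, m.2 ≤ y.2 := by
  intro y hy
  rw [← List.head?_reverse] at hm
  have hp' : l.reverse.Pairwise (fun a b => a.2 ≤ b.2) := by
    rw [List.pairwise_reverse]; exact hp
  cases hr : l.reverse with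
  | nil => simp [hr] at hm
  | cons a t =>
    rw [hr] at hm hp'
    simp at hm; subst hm
    rcases (List.mem_reverse.2 hy : y ∈ l.reverse) with h
    rw [hr] at h
    rcases List.mem_cons.1 h with h | h
    · subst h; exact le_refl _
    · exact (List.pairwise_cons.1 hp').1 y h

-- the scan over any list equals (head, last) of its stable reverse sort by the count
theorem scan_eq_sort (L : List (Char × Int)) :
    L.foldl bstep (none, none) =
      ((PySem.List.sorted L (fun p => p.2) true).head?,
       (PySem.List.sorted L (fun p => p.2) true).getLast?) := by
  induction L using List.reverseRecOn with
  | nil => simp [PySem.List.sorted]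
  | append_singleton L x ih =>
    have hs : ∀ M : List (Char × Int), PySem.List.sorted M (fun p => p.2) true =
        M.foldl (fun acc y => PySem.List.insertBy (fun a b => decide (b.2 < a.2)) y acc) [] :=
      fun M => PySem.List.sorted_rev_eq_foldl_insertBy M _
    have hstep : PySem.List.sorted (L ++ [x]) (fun p => p.2) true =
        PySem.List.insertBy (fun a b => decide (b.2 < a.2)) x
          (PySem.List.sorted L (fun p => p.2) true) := by
      rw [hs, hs, List.foldl_append]; simp
    rw [List.foldl_append, List.foldl_cons, List.foldl_nil, ih, hstep]
    set S := PySem.List.sorted L (fun p => p.2) true with hS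
    cases hC : S with
    | nil => simp [bstep, PySem.List.insertBy]
    | cons q t =>
      have hlast : S.getLast? = some (S.getLast (by simp [hC])) :=
        List.getLast?_eq_some_getLast (by simp [hC])
      set m := S.getLast (by simp [hC]) with hm
      have hmin : ∀ y ∈ S, m.2 ≤ y.2 :=
        getLast_min (by rw [hS]; exact PySem.List.sorted_pairwise_rev L _) hlast
      have hall : (S.all (fun y => ! decide (y.2 < x.2))) = decide (x.2 ≤ m.2) := by
        by_cases hx : x.2 ≤ m.2
        · simp only [hx, decide_true]
          rw [List.all_eq_true]
          intro y hy
          simp only [Bool.not_eq_true', decide_eq_false_iff_not, not_lt]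
          exact le_trans hx (hmin y hy)
        · simp only [hx, decide_false]
          rw [List.all_eq_false]
          refine ⟨m, List.mem_of_getLast? hlast, ?_⟩
          simp [not_le.1 hx]
        
      rw [← hC]
      rw [getLast?_insertBy, hall, hC, head?_insertBy, ← hC, hlast]
      simp only [bstep, hC, List.head?_cons]
      by_cases h1 : q.2 < x.2 <;> by_cases h2 : x.2 ≤ m.2 <;>
        simp [h1, h2]

-- counting loops agree: A's dict equals B's dict (both are Counter(s))
theorem dict_eq (cs : List Char) :
    cs.foldl (fun d c => (PySem.Dict.setdefault d c 0).modify c 0 (· + 1))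
      (PySem.Dict.empty : PySem.Dict Char Int) =
    cs.foldl (fun d c => d.insert c (d.getD c 0 + 1)) PySem.Dict.empty := by
  rw [PySem.List.foldl_congr_mem cs
      (fun d c => (PySem.Dict.setdefault d c 0).modify c 0 (· + 1))
      (fun d c => d.modify c 0 (· + 1)) PySem.Dict.empty
      (fun acc x _ => step_eq acc x),
    PySem.Dict.foldl_insert_getD_add_one_eq_counter]
  rfl

theorem items_counter_ne_nil (cs : List Char) (h : cs ≠ []) :
    (PySem.Dict.counter cs : PySem.Dict Char Int).items ≠ [] := by
  rw [PySem.Dict.items_counter]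
  intro hmap
  cases hc : cs with
  | nil => exact h hc
  | cons a t =>
    have ha : a ∈ PySem.Set.ofList cs := by
      rw [PySem.Set.mem_ofList, hc]; exact List.mem_cons_self
    rw [List.map_eq_nil_iff.1 hmap] at ha
    simp at ha

theorem solve_eq_solve_alt (n : Int) (s : String) (hs : s ≠ "") :
    solve n s = solve_alt n s := by
  unfold solve solve_alt
  simp only [dict_eq, scan_eq_sort, PySem.Dict.foldl_insert_getD_add_one_eq_counter]
  have hcsne : s.toList ≠ [] := fun h => hs (by simpa using congrArg String.ofList h)
  generalize hS : PySem.List.sorted (PySem.Dict.counter s.toList : PySem.Dict Char Int).items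
      (fun x => x.2) true = S
  have hSne : S ≠ [] := by
    rw [← hS, Ne, PySem.List.sorted_eq_nil_iff]
    exact items_counter_ne_nil s.toList hcsne
  cases S with
  | nil => exact absurd rfl hSne
  | cons q t =>
    rw [PySem.List.pyGet?_neg_one]
    simp [PySem.List.pyGet?, PySem.List.pyIdx?,
      List.getLast?_eq_some_getLast (l := q :: t) (by simp)]

-- ===== VERDICT (by name: the statement is the Claim_ definition above) =====
theorem solve_spec : Claim_equal_solve := by
  intro n s _ hpre
  unfold Spec_solve
  exact solve_eq_solve_alt n s hpre
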